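-- pv_equiv track=rewrite | github.com/the-lost-explorer/flowy | utils/flow_ascii.py | generate_ascii
-- ===== SOURCE A (Python) =====
-- def generate_ascii(edges):
--     from collections import defaultdict
--
--     # Build adjacency list
--     children = defaultdict(list)
--     for src, tgt in edges:
--         children[src].append(tgt)
--
--     visited = set()
--     lines = []
--
--     def dfs(node, prefix="", is_last=True):
--         if node in visited:
--             return
--         visited.add(node)
--
--         connector = "└── " if is_last else "├── "
--         lines.append(f"{prefix}{connector}{node}")
--
--         next_prefix = prefix + ("    " if is_last else "│   ")
--         for i, child in enumerate(children.get(node, [])):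
--             dfs(child, next_prefix, i == len(children[node]) - 1)
--
--
--     all_targets = {tgt for _, tgt in edges}
--     roots = [src for src, _ in edges if src not in all_targets]
--     if not roots:
--         roots = list(set(src for src, _ in edges))
--
--     for i, root in enumerate(roots):
--         dfs(root, "", i == len(roots) - 1)
--
--     return "\n".join(lines)
-- ===== SOURCE B (Python) =====
-- def generate_ascii(edges):
--     def kids(node):
--         return [t for s, t in edges if s == node]
--
--     def framed(nodes, prefix, rest):
--         # frames carry the fully-built connector prefix and child prefix; head of list = next node
--         if not nodes:
--             return rest
--         return ([(c, prefix + "├── ", prefix + "│   ") for c in nodes[:-1]]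
--                 + [(nodes[-1], prefix + "└── ", prefix + "    ")] + rest)
--
--     targets = {t for _, t in edges}
--     roots = [s for s, _ in edges if s not in targets]
--     if not roots:
--         roots = list(dict.fromkeys(s for s, _ in edges))
--
--     visited = set()
--     rev_lines = []
--     stack = framed(roots, "", [])
--     while stack:
--         (node, conn_prefix, child_prefix), stack = stack[0], stack[1:]
--         if node in visited:
--             continue
--         visited.add(node)
--         rev_lines = [conn_prefix + node] + rev_lines
--         stack = framed(kids(node), child_prefix, stack)
--     return "\n".join(reversed(rev_lines))
-- ===== Notes on version B (the rewrite author's own statement) =====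
-- stated objective: alternative
-- what changed: The recursive dfs over an adjacency defaultdict with enumerate/is_last flags and a forward line list is replaced by an iterative frame-stack traversal with no dict at all: children are recomputed by filtering the edge list, each pushed frame already carries its fully-built connector and child prefixes (last child split off from the rest instead of enumerate flags), and lines are accumulated in reverse and reversed once at the end.
-- outside the precondition, e.g. on generate_ascii([('b', 'a'), ('a', 'b')]): A returns '├── a\n│   └── b', B returns '├── b\n│   └── a'
import Mathlib
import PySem

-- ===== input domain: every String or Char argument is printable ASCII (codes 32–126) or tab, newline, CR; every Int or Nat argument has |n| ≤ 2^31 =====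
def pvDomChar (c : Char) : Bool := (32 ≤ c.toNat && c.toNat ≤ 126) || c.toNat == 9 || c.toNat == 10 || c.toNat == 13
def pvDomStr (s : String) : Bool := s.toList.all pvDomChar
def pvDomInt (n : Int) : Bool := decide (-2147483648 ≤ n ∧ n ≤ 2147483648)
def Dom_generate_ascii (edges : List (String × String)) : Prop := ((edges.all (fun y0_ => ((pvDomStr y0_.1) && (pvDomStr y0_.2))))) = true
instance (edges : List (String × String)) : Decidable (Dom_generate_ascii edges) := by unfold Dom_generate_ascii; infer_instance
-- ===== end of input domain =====

-- B replaces A's recursive dfs (adjacency dict + enumerate/is_last flags + forward line list) by an iterative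
-- frame-stack traversal with no dict: children are recomputed by filtering the edge list, each frame carries its
-- fully-built connector and child prefixes, and lines are accumulated in reverse; equal return values proved on Pre_.

-- ===== PORT A =====
-- recursive dfs of A; fuel is only a totality guard (edges.length + 2 always suffices, proved below)
def pvDfsA (children : PySem.Dict String (List String)) :
    Nat → String → String → Bool → PySem.Set String × List String → PySem.Set String × List String
  | 0, _, _, _, st => st
  | fuel + 1, node, prefix_, is_last, (visited, lines) =>
    if PySem.Set.contains visited node then (visited, lines)
    else
      let visited := PySem.Set.add visited node
      let connector := if is_last then "└── " else "├── "
      let lines := lines ++ [prefix_ ++ connector ++ node]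
      let next_prefix := prefix_ ++ (if is_last then "    " else "│   ")
      let cs := children.getD node []
      (PySem.List.enumerate cs).foldl
        (fun st ic => pvDfsA children fuel ic.2 next_prefix (ic.1 == (cs.length : Int) - 1) st)
        (visited, lines)

def generate_ascii (edges : List (String × String)) : String :=
  let children := edges.foldl (fun d e => PySem.Dict.modify d e.1 [] (fun v => v ++ [e.2])) PySem.Dict.empty
  let all_targets : PySem.Set String := PySem.Set.ofList (edges.map (fun e => e.2))
  let roots := (edges.filter (fun e => !(PySem.Set.contains all_targets e.1))).map (fun e => e.1)
  -- 'list(set(...))': Python iterates the set in hash order; ported in first-occurrence order, exact under Pre_ (≤ 1 distinct source there)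
  let roots := if roots.isEmpty then PySem.Set.ofList (edges.map (fun e => e.1)) else roots
  let st := (PySem.List.enumerate roots).foldl
      (fun st ic => pvDfsA children (edges.length + 2) ic.2 "" (ic.1 == (roots.length : Int) - 1) st)
      (PySem.Set.empty, [])
  PySem.Str.join "\n" st.2

-- ===== PORT B =====
-- children of a node recomputed from the edge list (Source B's 'kids'): no adjacency dict anywhere in B
def pvKids (edges : List (String × String)) (node : String) : List String :=
  (edges.filter (fun e => e.1 == node)).map (fun e => e.2)

-- Source B's 'framed': prepend the frame block of 'nodes' (all but the last with '├── ', the last with '└── ')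
-- onto the stack; head of the list = next node to pop
def pvFramed (nodes : List String) (prefix_ : String) (rest : List (String × String × String)) :
    List (String × String × String) :=
  match nodes.getLast? with
  | none => rest
  | some lastn =>
    nodes.dropLast.map (fun c => (c, prefix_ ++ "├── ", prefix_ ++ "│   ")) ++
      (lastn, prefix_ ++ "└── ", prefix_ ++ "    ") :: rest

-- Source B's while loop; fuel is only a totality guard
def pvLoopB (edges : List (String × String)) :
    Nat → List (String × String × String) → PySem.Set String × List String → PySem.Set String × List String
  | 0, _, st => st
  | _ + 1, [], st => st
  | fuel + 1, (node, conn_prefix, child_prefix) :: stack, (visited, rev_lines) =>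
    if PySem.Set.contains visited node then pvLoopB edges fuel stack (visited, rev_lines)
    else pvLoopB edges fuel (pvFramed (pvKids edges node) child_prefix stack)
      (PySem.Set.add visited node, (conn_prefix ++ node) :: rev_lines)

def generate_ascii_alt (edges : List (String × String)) : String :=
  let targets : PySem.Set String := PySem.Set.ofList (edges.map (fun e => e.2))
  let roots := (edges.filter (fun e => !(PySem.Set.contains targets e.1))).map (fun e => e.1)
  -- 'list(dict.fromkeys(...))' = first-occurrence order
  let roots := if roots.isEmpty then PySem.Set.ofList (edges.map (fun e => e.1)) else roots
  let st := pvLoopB edges (edges.length + roots.length + 1) (pvFramed roots "" []) (PySem.Set.empty, [])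
  PySem.Str.join "\n" st.2.reverse

-- ===== PRECONDITION & SPEC =====
-- Pre_ excludes edge lists with no root (every source also a target) and ≥ 2 distinct sources: there A orders the
-- fallback roots by Python's set hash-iteration order, an accident of the hash seed with no single value to match.
def Pre_generate_ascii (edges : List (String × String)) : Prop :=
  edges = [] ∨ (∃ e ∈ edges, ¬ e.1 ∈ edges.map (fun p => p.2)) ∨
    (PySem.List.dedup (edges.map (fun p => p.1))).length ≤ 1
instance (edges : List (String × String)) : Decidable (Pre_generate_ascii edges) := by
  unfold Pre_generate_ascii; infer_instance
def pvWitness_generate_ascii : (List (String × String)) := ([("a", "b"), ("a", "c")])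
def Spec_generate_ascii (edges : List (String × String)) (out : String) : Prop := out = generate_ascii_alt edges
instance (edges : List (String × String)) (out : String) : Decidable (Spec_generate_ascii edges out) := by
  unfold Spec_generate_ascii; infer_instance

-- ===== CLAIM (what is proved, stated in full; the proofs are below) =====
def Claim_equal_generate_ascii : Prop := ∀ (edges : List (String × String)), Dom_generate_ascii edges → Pre_generate_ascii edges → Spec_generate_ascii edges (generate_ascii edges)

-- ===== LEMMAS AND PROOFS =====

-- the children dict A builds, and the A-side frame shapes the proofs speak about
def pvChildren (edges : List (String × String)) : PySem.Dict String (List String) :=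
  edges.foldl (fun d e => PySem.Dict.modify d e.1 [] (fun v => v ++ [e.2])) PySem.Dict.empty

def pvFramesOf (np : String) (cs : List String) : List (String × String × Bool) :=
  (PySem.List.enumerate cs).map (fun ic => (ic.2, np, ic.1 == (cs.length : Int) - 1))

-- an A-frame (node, prefix, is_last) rendered as a B-frame (node, connector prefix, child prefix)
def pvTrans (fr : String × String × Bool) : String × String × String :=
  (fr.1, fr.2.1 ++ (if fr.2.2 then "└── " else "├── "), fr.2.1 ++ (if fr.2.2 then "    " else "│   "))

def pvRunA (children : PySem.Dict String (List String)) (f : Nat)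
    (frames : List (String × String × Bool)) (st : PySem.Set String × List String) :
    PySem.Set String × List String :=
  frames.foldl (fun st fr => pvDfsA children f fr.1 fr.2.1 fr.2.2 st) st

-- how many distinct target nodes are still unvisited / how many edges still have an unvisited source
def pvUnvis (edges : List (String × String)) (vis : PySem.Set String) : Nat :=
  ((PySem.List.dedup (edges.map (fun e => e.2))).filter (fun x => !(PySem.Set.contains vis x))).length
def pvPot (edges : List (String × String)) (vis : PySem.Set String) : Nat :=
  (edges.filter (fun e => !(PySem.Set.contains vis e.1))).length

theorem pvChildren_getD (edges : List (String × String)) (n : String) :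
    (pvChildren edges).getD n [] = (edges.filter (fun p => p.1 == n)).map (fun p => p.2) := by
  simpa [pvChildren] using PySem.Dict.getD_foldl_modify_append (l := edges) (d := PySem.Dict.empty) (c := n)

theorem pvKids_eq (edges : List (String × String)) (n : String) :
    pvKids edges n = (pvChildren edges).getD n [] := by
  rw [pvChildren_getD]; rfl

theorem pvDfsA_succ (children : PySem.Dict String (List String)) (f : Nat) (node prefix_ : String)
    (is_last : Bool) (vis : PySem.Set String) (ls : List String) :
    pvDfsA children (f + 1) node prefix_ is_last (vis, ls) =
      if PySem.Set.contains vis node then (vis, ls)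
      else pvRunA children f
        (pvFramesOf (prefix_ ++ (if is_last then "    " else "│   ")) (children.getD node []))
        (PySem.Set.add vis node, ls ++ [prefix_ ++ (if is_last then "└── " else "├── ") ++ node]) := by
  simp only [pvDfsA, pvRunA, pvFramesOf, List.foldl_map]

-- the frame block Source B's 'framed' builds is exactly the rendered A-frame block
theorem pvEnumTrans (np : String) : ∀ (cs : List String) (s t : Int), t = s + (cs.length : Int) - 1 →
    (PySem.List.enumerate cs s).map (fun ic => pvTrans (ic.2, np, ic.1 == t)) = pvFramed cs np [] := by
  intro cs
  induction cs with
  | nil => intro s t _; rfl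
  | cons x rest ih =>
    intro s t ht
    rw [PySem.List.enumerate_cons, List.map_cons]
    cases rest with
    | nil =>
      have : (s == t) = true := by simp only [List.length_cons, List.length_nil] at ht; simp; omega
      simp [this, pvTrans, pvFramed, PySem.List.enumerate_nil]
    | cons y r =>
      have hne : (s == t) = false := by
        simp only [List.length_cons] at ht
        simp only [beq_eq_false_iff_ne, ne_eq]
        intro h; subst h; push_cast at ht; omega
      have hrec := ih (s + 1) t (by simp only [List.length_cons] at ht ⊢; push_cast at ht ⊢; omega)
      rw [hrec]
      simp only [hne, pvTrans, pvFramed, List.getLast?_cons_cons, List.dropLast_cons_of_ne_nil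
        (by simp : (y :: r) ≠ []), List.map_cons, List.cons_append]
      cases h : (y :: r).getLast? with
      | none => simp at h
      | some lastn => simp

theorem pvFramesTrans (np : String) (cs : List String) :
    (pvFramesOf np cs).map pvTrans = pvFramed cs np [] := by
  rw [pvFramesOf, List.map_map]
  exact pvEnumTrans np cs 0 ((cs.length : Int) - 1) (by omega)

theorem pvFramed_append (cs : List String) (np : String) (rest : List (String × String × String)) :
    pvFramed cs np rest = pvFramed cs np [] ++ rest := by
  cases h : cs.getLast? with
  | none => simp [pvFramed, h]
  | some lastn => simp [pvFramed, h]

theorem pvRunA_append (children : PySem.Dict String (List String)) (f : Nat)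
    (fr1 fr2 : List (String × String × Bool)) (st : PySem.Set String × List String) :
    pvRunA children f (fr1 ++ fr2) st = pvRunA children f fr2 (pvRunA children f fr1 st) := by
  simp [pvRunA, List.foldl_append]

theorem pvFramesOf_length (np : String) (cs : List String) : (pvFramesOf np cs).length = cs.length := by
  simp [pvFramesOf, PySem.List.length_enumerate]

theorem pvFramesOf_mem (edges : List (String × String)) (np n : String)
    (fr : String × String × Bool) (h : fr ∈ pvFramesOf np ((pvChildren edges).getD n [])) :
    fr.1 ∈ edges.map (fun e => e.2) := by
  simp only [pvFramesOf, pvChildren_getD, List.mem_map, PySem.List.mem_enumerate_iff] at h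
  obtain ⟨ic, ⟨k, hk, hic⟩, rfl⟩ := h
  subst hic
  simp only [List.getElem_map]
  exact List.mem_map.mpr ⟨_, List.mem_of_mem_filter (List.getElem_mem _), rfl⟩

-- filter-count monotonicity and strict decrease when a present element becomes visited
theorem pv_filter_mono (l : List String) (vis vis' : PySem.Set String)
    (h : ∀ x, x ∈ vis → x ∈ vis') :
    (l.filter (fun x => !(PySem.Set.contains vis' x))).length ≤
      (l.filter (fun x => !(PySem.Set.contains vis x))).length := by
  induction l with
  | nil => simp
  | cons a t ih =>
    have key := ih
    simp only [List.filter_cons] at key ⊢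
    simp at key ⊢
    by_cases hb : a ∈ vis
    · have hb' : a ∈ vis' := h _ hb
      simp [hb, hb']
      omega
    · by_cases hb' : a ∈ vis'
      · simp [hb, hb']
        omega
      · simp [hb, hb']
        omega

theorem pvUnvis_mono (edges : List (String × String)) (vis vis' : PySem.Set String)
    (h : ∀ x, x ∈ vis → x ∈ vis') : pvUnvis edges vis' ≤ pvUnvis edges vis := by
  exact pv_filter_mono _ _ _ h

theorem pvUnvis_le (edges : List (String × String)) (vis : PySem.Set String) :
    pvUnvis edges vis ≤ edges.length := by
  calc pvUnvis edges vis ≤ (PySem.List.dedup (edges.map (fun e => e.2))).length :=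
        List.length_filter_le _ _
    _ ≤ (edges.map (fun e => e.2)).length := by
        simpa using PySem.Set.length_ofList_le (xs := edges.map (fun e => e.2))
    _ = edges.length := List.length_map ..

theorem pv_not_contains_of_not_mem (vis : PySem.Set String) (n : String) (hv : ¬ n ∈ vis) :
    PySem.Set.contains vis n = false := by
  rw [Bool.eq_false_iff]
  intro hc
  exact hv ((PySem.Set.contains_iff _ _).mp hc)

theorem pv_filter_add_lt (l : List String) (vis : PySem.Set String) (n : String)
    (hn : n ∈ l) (hv : ¬ n ∈ vis) :
    (l.filter (fun x => !(PySem.Set.contains (PySem.Set.add vis n) x))).length <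
      (l.filter (fun x => !(PySem.Set.contains vis x))).length := by
  induction l with
  | nil => cases hn
  | cons a t ih =>
    have key := pv_filter_mono t vis (PySem.Set.add vis n)
      (fun x hx => (PySem.Set.mem_add _ _ _).mpr (Or.inl hx))
    simp at key ⊢
    by_cases ha : a = n
    · subst ha
      simp [hv]
      omega
    · have hmem : n ∈ t := by
        rcases List.mem_cons.mp hn with h | h
        · exact absurd h.symm ha
        · exact h
      have key2 := ih hmem
      simp at key2
      by_cases hb : a ∈ vis
      · simp [ha, hb]
        omega
      · simp [ha, hb]
        omega

theorem pvUnvis_add_lt (edges : List (String × String)) (vis : PySem.Set String) (n : String)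
    (hn : n ∈ edges.map (fun e => e.2)) (hv : ¬ n ∈ vis) :
    pvUnvis edges (PySem.Set.add vis n) < pvUnvis edges vis := by
  exact pv_filter_add_lt _ _ _ (by simpa [PySem.List.mem_dedup] using hn) hv

theorem pvPot_add (edges : List (String × String)) (vis : PySem.Set String) (n : String)
    (hv : ¬ n ∈ vis) :
    pvPot edges (PySem.Set.add vis n) + (edges.filter (fun p => p.1 == n)).length = pvPot edges vis := by
  induction edges with
  | nil => simp [pvPot]
  | cons e t ih =>
    have key := ih
    simp only [pvPot, List.filter_cons] at key ⊢
    simp at key ⊢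
    by_cases he : e.1 = n
    · simp [he, hv]
      omega
    · by_cases hb : e.1 ∈ vis
      · simp [he, hb]
        omega
      · simp [he, hb]
        omega

-- visited only grows through the traversal
theorem pvRunA_growth_of (children : PySem.Dict String (List String)) (f : Nat) (x : String)
    (hstep : ∀ (n p : String) (l : Bool) (vis : PySem.Set String) (ls : List String),
      x ∈ vis → x ∈ (pvDfsA children f n p l (vis, ls)).1) :
    ∀ (frames : List (String × String × Bool)) (st : PySem.Set String × List String),
      x ∈ st.1 → x ∈ (pvRunA children f frames st).1 := by
  intro frames
  induction frames with
  | nil => intro st hx; exact hx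
  | cons fr rest ih =>
    intro st hx
    simp only [pvRunA, List.foldl_cons] at ih ⊢
    obtain ⟨vis, ls⟩ := st
    exact ih _ (hstep _ _ _ _ _ hx)

theorem pvDfsA_growth (children : PySem.Dict String (List String)) :
    ∀ (f : Nat) (n p : String) (l : Bool) (vis : PySem.Set String) (ls : List String) (x : String),
      x ∈ vis → x ∈ (pvDfsA children f n p l (vis, ls)).1 := by
  intro f
  induction f with
  | zero => intro n p l vis ls x hx; simpa [pvDfsA] using hx
  | succ f ih =>
    intro n p l vis ls x hx
    rw [pvDfsA_succ]
    by_cases hc : n ∈ vis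
    · simp [hc]
      exact hx
    · simp only [pv_not_contains_of_not_mem vis n hc, Bool.false_eq_true, if_false]
      exact pvRunA_growth_of children f x (fun n' p' l' vis' ls' h => ih n' p' l' vis' ls' x h) _ _
        ((PySem.Set.mem_add _ _ _).mpr (Or.inl hx))

-- fuel irrelevance: any two sufficient fuels give the same result
theorem pvRunA_mono_of (edges : List (String × String)) (f f' : Nat)
    (hdfs : ∀ (n p : String) (l : Bool) (vis : PySem.Set String) (ls : List String),
      n ∈ edges.map (fun e => e.2) → pvUnvis edges vis + 1 ≤ f → pvUnvis edges vis + 1 ≤ f' →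
      pvDfsA (pvChildren edges) f n p l (vis, ls) = pvDfsA (pvChildren edges) f' n p l (vis, ls)) :
    ∀ (frames : List (String × String × Bool)) (vis : PySem.Set String) (ls : List String),
      (∀ fr ∈ frames, fr.1 ∈ edges.map (fun e => e.2)) →
      pvUnvis edges vis + 1 ≤ f → pvUnvis edges vis + 1 ≤ f' →
      pvRunA (pvChildren edges) f frames (vis, ls) = pvRunA (pvChildren edges) f' frames (vis, ls) := by
  intro frames
  induction frames with
  | nil => intro vis ls _ _ _; rfl
  | cons fr rest ih =>
    intro vis ls hmem h1 h2
    simp only [pvRunA, List.foldl_cons]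
    have hd : pvDfsA (pvChildren edges) f fr.1 fr.2.1 fr.2.2 (vis, ls) =
        pvDfsA (pvChildren edges) f' fr.1 fr.2.1 fr.2.2 (vis, ls) :=
      hdfs _ _ _ _ _ (hmem fr List.mem_cons_self) h1 h2
    rw [← hd]
    have hgrow : ∀ x, x ∈ vis → x ∈ (pvDfsA (pvChildren edges) f fr.1 fr.2.1 fr.2.2 (vis, ls)).1 :=
      fun x hx => pvDfsA_growth _ f _ _ _ _ _ x hx
    have hb := pvUnvis_mono edges vis (pvDfsA (pvChildren edges) f fr.1 fr.2.1 fr.2.2 (vis, ls)).1 hgrow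
    have h3 := ih (pvDfsA (pvChildren edges) f fr.1 fr.2.1 fr.2.2 (vis, ls)).1
      (pvDfsA (pvChildren edges) f fr.1 fr.2.1 fr.2.2 (vis, ls)).2
      (fun fr' h' => hmem fr' (List.mem_cons_of_mem _ h')) (by omega) (by omega)
    simpa [pvRunA] using h3

theorem pvDfsA_mono (edges : List (String × String)) :
    ∀ (f f' : Nat) (n p : String) (l : Bool) (vis : PySem.Set String) (ls : List String),
      pvUnvis edges vis + (if n ∈ edges.map (fun e => e.2) then 1 else 2) ≤ f →
      pvUnvis edges vis + (if n ∈ edges.map (fun e => e.2) then 1 else 2) ≤ f' →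
      pvDfsA (pvChildren edges) f n p l (vis, ls) = pvDfsA (pvChildren edges) f' n p l (vis, ls) := by
  intro f
  induction f with
  | zero =>
    intro f' n p l vis ls h h'
    exfalso
    split at h <;> omega
  | succ f ih =>
    intro f' n p l vis ls h h'
    match f', h' with
    | 0, h' => exfalso; split at h' <;> omega
    | f' + 1, h' =>
      rw [pvDfsA_succ, pvDfsA_succ]
      by_cases hc : n ∈ vis
      · rw [if_pos ((PySem.Set.contains_iff _ _).mpr hc), if_pos ((PySem.Set.contains_iff _ _).mpr hc)]
      · simp only [pv_not_contains_of_not_mem vis n hc, Bool.false_eq_true, if_false]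
        have hlt : n ∈ edges.map (fun e => e.2) → pvUnvis edges (PySem.Set.add vis n) < pvUnvis edges vis :=
          fun hn => pvUnvis_add_lt edges vis n hn hc
        have hle : pvUnvis edges (PySem.Set.add vis n) ≤ pvUnvis edges vis :=
          pvUnvis_mono edges vis _ (fun x hx => (PySem.Set.mem_add _ _ _).mpr (Or.inl hx))
        apply pvRunA_mono_of edges f f'
          (fun n' p' l' vis' ls' hn' hb1 hb2 => ih f' n' p' l' vis' ls' (by rw [if_pos hn']; exact hb1) (by rw [if_pos hn']; exact hb2))
          _ _ _ (fun fr hfr => pvFramesOf_mem edges _ n fr hfr)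
        · split at h
          · have := hlt (by assumption); omega
          · omega
        · split at h'
          · have := hlt (by assumption); omega
          · omega

-- the simulation: B's frame-stack loop computes the rendered A-frame traversal, with the line list reversed
theorem pvSim (edges : List (String × String)) :
    ∀ (fB : Nat) (frames : List (String × String × Bool)) (vis : PySem.Set String) (ls : List String),
      frames.length + pvPot edges vis ≤ fB →
      pvLoopB edges fB (frames.map pvTrans) (vis, ls.reverse) =
        ((pvRunA (pvChildren edges) (edges.length + 2) frames (vis, ls)).1,
         (pvRunA (pvChildren edges) (edges.length + 2) frames (vis, ls)).2.reverse) := by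
  intro fB
  induction fB with
  | zero =>
    intro frames vis ls h
    have : frames = [] := List.eq_nil_of_length_eq_zero (by omega)
    subst this
    rfl
  | succ fB ih =>
    intro frames vis ls h
    match frames with
    | [] => rfl
    | (n, p, l) :: rest =>
      have hrunA : pvRunA (pvChildren edges) (edges.length + 2) ((n, p, l) :: rest) (vis, ls) =
          pvRunA (pvChildren edges) (edges.length + 2) rest
            (pvDfsA (pvChildren edges) (edges.length + 2) n p l (vis, ls)) := by
        simp only [pvRunA, List.foldl_cons]
      rw [hrunA]
      have hmap : ((n, p, l) :: rest).map pvTrans =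
          (n, p ++ (if l then "└── " else "├── "), p ++ (if l then "    " else "│   ")) :: rest.map pvTrans := by
        simp [pvTrans]
      rw [hmap, pvLoopB]
      by_cases hc : n ∈ vis
      · rw [if_pos ((PySem.Set.contains_iff _ _).mpr hc)]
        have hd : pvDfsA (pvChildren edges) (edges.length + 2) n p l (vis, ls) = (vis, ls) := by
          rw [show edges.length + 2 = (edges.length + 1) + 1 from rfl, pvDfsA_succ,
            if_pos ((PySem.Set.contains_iff _ _).mpr hc)]
        rw [hd]
        apply ih
        simp only [List.length_cons] at h
        omega
      · rw [if_neg (by rw [pv_not_contains_of_not_mem vis n hc]; exact Bool.false_ne_true)]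
        have hd : pvDfsA (pvChildren edges) (edges.length + 2) n p l (vis, ls) =
            pvRunA (pvChildren edges) (edges.length + 1)
              (pvFramesOf (p ++ (if l then "    " else "│   "))  ((pvChildren edges).getD n []))
              (PySem.Set.add vis n, ls ++ [p ++ (if l then "└── " else "├── ") ++ n]) := by
          rw [show edges.length + 2 = (edges.length + 1) + 1 from rfl, pvDfsA_succ,
            if_neg (by rw [pv_not_contains_of_not_mem vis n hc]; exact Bool.false_ne_true)]
        rw [hd]
        have hstack : pvFramed (pvKids edges n) (p ++ (if l then "    " else "│   ")) (rest.map pvTrans) =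
            ((pvFramesOf (p ++ (if l then "    " else "│   ")) ((pvChildren edges).getD n [])) ++ rest).map pvTrans := by
          rw [pvKids_eq, pvFramed_append, List.map_append, ← pvFramesTrans]
        rw [hstack]
        have hrev : (p ++ (if l then "└── " else "├── ") ++ n) :: ls.reverse =
            (ls ++ [p ++ (if l then "└── " else "├── ") ++ n]).reverse := by
          simp
        rw [hrev]
        have hcs : ((pvChildren edges).getD n []).length = (edges.filter (fun p => p.1 == n)).length := by
          rw [pvChildren_getD]; exact List.length_map ..
        have hpot := pvPot_add edges vis n hc
        have hbound : ((pvFramesOf (p ++ (if l then "    " else "│   ")) ((pvChildren edges).getD n [])) ++ rest).length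
            + pvPot edges (PySem.Set.add vis n) ≤ fB := by
          rw [List.length_append, pvFramesOf_length, hcs]
          simp only [List.length_cons] at h
          omega
        rw [ih _ _ _ hbound]
        rw [pvRunA_append]
        have hfuel : pvRunA (pvChildren edges) (edges.length + 2)
              (pvFramesOf (p ++ (if l then "    " else "│   ")) ((pvChildren edges).getD n []))
              (PySem.Set.add vis n, ls ++ [p ++ (if l then "└── " else "├── ") ++ n]) =
            pvRunA (pvChildren edges) (edges.length + 1)
              (pvFramesOf (p ++ (if l then "    " else "│   ")) ((pvChildren edges).getD n []))
              (PySem.Set.add vis n, ls ++ [p ++ (if l then "└── " else "├── ") ++ n]) := by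
          apply pvRunA_mono_of edges (edges.length + 2) (edges.length + 1)
            (fun n' p' l' vis' ls' hn' hb1 hb2 =>
              pvDfsA_mono edges (edges.length + 2) (edges.length + 1) n' p' l' vis' ls'
                (by rw [if_pos hn']; exact hb1) (by rw [if_pos hn']; exact hb2))
            _ _ _ (fun fr hfr => pvFramesOf_mem edges _ n fr hfr)
          · have := pvUnvis_le edges (PySem.Set.add vis n)
            omega
          · have := pvUnvis_le edges (PySem.Set.add vis n)
            omega
        rw [hfuel]

def pvRoots (edges : List (String × String)) : List String :=
  let r := (edges.filter (fun e => !(PySem.Set.contains (PySem.Set.ofList (edges.map (fun e => e.2))) e.1))).map (fun e => e.1)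
  if r.isEmpty then PySem.Set.ofList (edges.map (fun e => e.1)) else r

theorem pvGenA_eq (edges : List (String × String)) :
    generate_ascii edges =
      PySem.Str.join "\n"
        (pvRunA (pvChildren edges) (edges.length + 2) (pvFramesOf "" (pvRoots edges)) (PySem.Set.empty, [])).2 := by
  simp only [generate_ascii, pvRunA, pvFramesOf, pvRoots, pvChildren, List.foldl_map]

theorem pvGenB_eq (edges : List (String × String)) :
    generate_ascii_alt edges =
      PySem.Str.join "\n"
        (pvLoopB edges (edges.length + (pvRoots edges).length + 1)
          (pvFramed (pvRoots edges) "" []) (PySem.Set.empty, [])).2.reverse := by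
  simp only [generate_ascii_alt, pvRoots]

-- ===== VERDICT (by name: the statement is the Claim_ definition above) =====
theorem generate_ascii_spec : Claim_equal_generate_ascii := by
  intro edges _hdom _hpre
  show generate_ascii edges = generate_ascii_alt edges
  rw [pvGenA_eq, pvGenB_eq]
  have hstart : pvFramed (pvRoots edges) "" [] = (pvFramesOf "" (pvRoots edges)).map pvTrans :=
    (pvFramesTrans "" (pvRoots edges)).symm
  rw [hstart]
  have hsim := pvSim edges (edges.length + (pvRoots edges).length + 1)
    (pvFramesOf "" (pvRoots edges)) PySem.Set.empty []
    (by
      rw [pvFramesOf_length]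
      have hpot : pvPot edges PySem.Set.empty ≤ edges.length := List.length_filter_le _ _
      omega)
  simp only [List.reverse_nil] at hsim
  rw [hsim, List.reverse_reverse]
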